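-- pv_equiv track=rewrite | github.com/dmitry487/python-Ege2024 | ege/ege2/9/48457/48457.py | check
-- ===== SOURCE A (Python) =====
-- def check(row):
--     povtor = set()
--     nepovtor = []
--     for num in row:
--         if row.count(num) == 1:
--             nepovtor.append(num)
--         if row.count(num) > 1:
--             povtor.add(num)
--
--     if (
--         (
--             (len(set(row)) == 4) and (len(set(row)) < len(row))
--         )and
--         (
--             (sum(povtor)) > (sum(nepovtor))
--         )
--     ): return True
--     return False
-- ===== SOURCE B (Python) =====
-- def check(row):
--     s = sorted(row)
--     d = p = q = 0
--     while s:
--         x = s[0]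
--         k = 1
--         s = s[1:]
--         while s and s[0] == x:
--             k += 1
--             s = s[1:]
--         d += 1
--         if k > 1:
--             p += x
--         else:
--             q += x
--     return d == 4 and d < len(row) and p > q
-- ===== Notes on version B (the rewrite author's own statement) =====
-- stated objective: faster
-- what changed: Sorts the row and makes one run-length scan over maximal runs of equal elements, counting distinct values and summing run heads into the duplicate/unique sums, instead of calling row.count for every element.
import Mathlib
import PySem

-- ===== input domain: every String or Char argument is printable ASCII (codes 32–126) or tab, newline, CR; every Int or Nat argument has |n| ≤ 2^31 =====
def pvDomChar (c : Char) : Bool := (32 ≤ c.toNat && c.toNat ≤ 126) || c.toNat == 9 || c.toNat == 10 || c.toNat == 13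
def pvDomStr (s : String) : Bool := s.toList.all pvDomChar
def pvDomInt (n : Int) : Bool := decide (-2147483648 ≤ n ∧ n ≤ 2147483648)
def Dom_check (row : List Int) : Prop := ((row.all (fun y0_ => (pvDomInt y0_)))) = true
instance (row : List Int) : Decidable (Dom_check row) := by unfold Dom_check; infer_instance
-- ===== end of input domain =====

-- B sorts the row and run-length-scans maximal runs of equal elements instead of
-- calling row.count per element (faster: O(n log n) vs O(n^2)).


-- ===== PORT A =====
def check (row : List Int) : Bool :=
  let st := row.foldl (fun (st : PySem.Set Int × List Int) num =>
      let st := if PySem.List.count row num == 1 then (st.1, st.2 ++ [num]) else st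
      if 1 < PySem.List.count row num then (PySem.Set.add st.1 num, st.2) else st)
    (PySem.Set.empty, [])
  if ((PySem.Set.ofList row).len == 4 && (PySem.Set.ofList row).len < (row.length : Int))
      && (st.1.sum > st.2.sum) then
    true
  else
    false

-- ===== PORT B =====
-- inner while loop: strip the leading copies of x off s, counting them into k
def stripRun (x : Int) : List Int → Int → List Int × Int
  | [], k => ([], k)
  | y :: ys, k => if y == x then stripRun x ys (k + 1) else (y :: ys, k)

theorem stripRun_length_le (x : Int) (l : List Int) (k : Int) :
    (stripRun x l k).1.length ≤ l.length := by
  induction l generalizing k with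
  | nil => simp [stripRun]
  | cons y ys ih =>
    simp only [stripRun]
    split
    · exact le_trans (ih _) (Nat.le_succ _)
    · simp

-- outer while loop over the sorted list, state (d, p, q)
def runLoop : List Int → Int × Int × Int → Int × Int × Int
  | [], acc => acc
  | x :: s1, (d, p, q) =>
      let r := stripRun x s1 1
      runLoop r.1 (if 1 < r.2 then (d + 1, p + x, q) else (d + 1, p, q + x))
  termination_by l => l.length
  decreasing_by
    exact Nat.lt_succ_of_le (stripRun_length_le x s1 1)

def check_alt (row : List Int) : Bool :=
  let r := runLoop (PySem.List.sorted row (fun v => v) false) (0, 0, 0)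
  r.1 == 4 && decide (r.1 < (row.length : Int)) && decide (r.2.1 > r.2.2)

-- ===== PRECONDITION & SPEC =====
def Spec_check (row : List Int) (out : Bool) : Prop := out = check_alt row
instance (row : List Int) (out : Bool) : Decidable (Spec_check row out) := by unfold Spec_check; infer_instance

-- ===== CLAIM (what is proved, stated in full; the proofs are below) =====
def Claim_equal_check : Prop := ∀ (row : List Int), Dom_check row → Spec_check row (check row)

-- ===== LEMMAS AND PROOFS =====

-- A's loop: povtor collects (as a set) the elements of count > 1, nepovtor the elements of count 1.
theorem check_foldA (row rest : List Int) (s : PySem.Set Int) (l : List Int) :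
    rest.foldl (fun (st : PySem.Set Int × List Int) num =>
        let st := if PySem.List.count row num == 1 then (st.1, st.2 ++ [num]) else st
        if 1 < PySem.List.count row num then (PySem.Set.add st.1 num, st.2) else st)
      (s, l)
    = (PySem.Set.update s (rest.filter (fun n => decide (1 < List.count n row))),
       l ++ rest.filter (fun n => List.count n row == 1)) := by
  induction rest generalizing s l with
  | nil => simp [PySem.Set.update]
  | cons x xs ih =>
    simp only [List.foldl_cons, List.filter_cons, PySem.List.count_eq, beq_iff_eq, PySem.Set.update] at ih ⊢
    by_cases h1 : List.count x row = 1
    · simp [h1, ih]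
    · by_cases h2 : 1 < List.count x row
      · have : ¬ (List.count x row = 1) := h1
        simp [h2, this, ih]
      · simp [h1, h2, ih]

-- stripRun is takeWhile/dropWhile
theorem stripRun_eq (x : Int) (l : List Int) (k : Int) :
    stripRun x l k = (l.dropWhile (· == x), k + ((l.takeWhile (· == x)).length : Int)) := by
  induction l generalizing k with
  | nil => simp [stripRun]
  | cons y ys ih =>
    simp only [stripRun, List.dropWhile_cons, List.takeWhile_cons]
    by_cases h : y = x
    · simp [h, ih]
      ring
    · simp [h]

-- PySem set of a list sums like the list's toFinset
theorem set_sum_toFinset (L : List Int) :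
    (PySem.Set.ofList L).sum = ∑ v ∈ L.toFinset, v := by
  have hnd := PySem.Set.nodup_ofList L
  have htf : (PySem.Set.ofList L).toFinset = L.toFinset := by
    ext v; simp [PySem.Set.mem_ofList]
  rw [← htf, List.sum_toFinset _ hnd]
  simp

theorem mem_takeWhile_eq_self (x : Int) (s1 : List Int) :
    ∀ y ∈ s1.takeWhile (· == x), y = x := by
  intro y hy
  have h := List.mem_takeWhile_imp hy
  simpa using h

theorem not_mem_dropWhile_sorted (x : Int) (s1 : List Int)
    (hl : (x :: s1).Pairwise (· ≤ ·)) : x ∉ s1.dropWhile (· == x) := by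
  intro hx
  rcases List.pairwise_cons.mp hl with ⟨hxle, hs1⟩
  cases hr : s1.dropWhile (· == x) with
  | nil => rw [hr] at hx; simp at hx
  | cons h tr =>
    rw [hr] at hx
    have hhx : ¬ h = x := by
      have h2 := List.head_dropWhile_not (p := (· == x)) (l := s1) (by simp [hr])
      simp only [hr, List.head_cons] at h2
      simpa using h2
    have hsl : (h :: tr).Sublist s1 := hr ▸ List.dropWhile_sublist _
    have hhl : h ∈ s1 := hsl.subset List.mem_cons_self
    have hx_le_h : x ≤ h := hxle h hhl
    rcases List.mem_cons.mp hx with heq | hx'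
    · exact hhx heq.symm
    · have hp : (h :: tr).Pairwise (· ≤ ·) := hs1.sublist hsl
      have hle : h ≤ x := (List.pairwise_cons.mp hp).1 x hx'
      exact hhx (le_antisymm hle hx_le_h)

theorem count_takeWhile_self (x : Int) (s1 : List Int) :
    List.count x (s1.takeWhile (· == x)) = (s1.takeWhile (· == x)).length := by
  apply List.count_eq_length.mpr
  intro y hy
  have := mem_takeWhile_eq_self x s1 y hy
  simp [this]

theorem count_takeWhile_ne (x v : Int) (s1 : List Int) (hv : v ≠ x) :
    List.count v (s1.takeWhile (· == x)) = 0 := by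
  apply List.count_eq_zero.mpr
  intro hm
  exact hv (mem_takeWhile_eq_self x s1 v hm)

-- decomposition facts for a sorted cons
theorem count_head_sorted (x : Int) (s1 : List Int) (hl : (x :: s1).Pairwise (· ≤ ·)) :
    List.count x (x :: s1) = 1 + (s1.takeWhile (· == x)).length := by
  have hsplit : s1 = s1.takeWhile (· == x) ++ s1.dropWhile (· == x) :=
    (List.takeWhile_append_dropWhile).symm
  rw [List.count_cons_self]
  conv_lhs => rw [hsplit]
  rw [List.count_append, count_takeWhile_self,
    List.count_eq_zero.mpr (not_mem_dropWhile_sorted x s1 hl)]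
  omega

theorem count_tail_sorted (x v : Int) (s1 : List Int) (hv : v ≠ x) :
    List.count v (x :: s1) = List.count v (s1.dropWhile (· == x)) := by
  have hsplit : s1 = s1.takeWhile (· == x) ++ s1.dropWhile (· == x) :=
    (List.takeWhile_append_dropWhile).symm
  have h1 : List.count v (x :: s1) = List.count v s1 := by
    simp [Ne.symm hv]
  rw [h1]
  conv_lhs => rw [hsplit]
  rw [List.count_append, count_takeWhile_ne x v s1 hv]
  omega

theorem toFinset_cons_sorted (x : Int) (s1 : List Int) :
    (x :: s1).toFinset = insert x (s1.dropWhile (· == x)).toFinset := by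
  ext v
  simp only [List.toFinset_cons, Finset.mem_insert, List.mem_toFinset]
  constructor
  · rintro (rfl | hv)
    · exact Or.inl rfl
    · conv at hv => rw [(List.takeWhile_append_dropWhile (p := (· == x)) (l := s1)).symm]
      rcases List.mem_append.mp hv with h | h
      · exact Or.inl (mem_takeWhile_eq_self x s1 v h)
      · exact Or.inr h
  · rintro (rfl | hv)
    · exact Or.inl rfl
    · exact Or.inr ((List.dropWhile_sublist _).subset hv)

-- run-length scan on a sorted list computes distinct count and the two sums
theorem runLoop_spec (n : Nat) : ∀ (l : List Int), l.length ≤ n → l.Pairwise (· ≤ ·) →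
    ∀ (d p q : Int), runLoop l (d, p, q)
    = (d + (l.toFinset.card : Int),
       p + ∑ v ∈ l.toFinset.filter (fun v => 1 < List.count v l), v,
       q + ∑ v ∈ l.toFinset.filter (fun v => List.count v l = 1), v) := by
  induction n with
  | zero =>
    intro l hn _ d p q
    have : l = [] := List.eq_nil_of_length_eq_zero (Nat.le_zero.mp hn)
    subst this
    simp [runLoop]
  | succ n ih =>
    intro l hn hsort d p q
    cases l with
    | nil => simp [runLoop]
    | cons x s1 =>
      have hxle := (List.pairwise_cons.mp hsort).1
      have hs1 := (List.pairwise_cons.mp hsort).2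
      simp only [runLoop, stripRun_eq]
      set t := s1.takeWhile (· == x) with ht
      set r := s1.dropWhile (· == x) with hr
      have hrsub : r.Sublist s1 := List.dropWhile_sublist _
      have hrsort : r.Pairwise (· ≤ ·) := hs1.sublist hrsub
      have hrlen : r.length ≤ n := by
        have := hrsub.length_le
        simp only [List.length_cons] at hn
        omega
      have hxnr : x ∉ r := not_mem_dropWhile_sorted x s1 hsort
      have hxnrF : x ∉ r.toFinset := by simpa using hxnr
      have hcx : List.count x (x :: s1) = 1 + t.length := count_head_sorted x s1 hsort
      have hcv : ∀ v ∈ r.toFinset, List.count v (x :: s1) = List.count v r := by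
        intro v hv
        exact count_tail_sorted x v s1 (fun h => hxnrF (h ▸ hv))
      have htf : (x :: s1).toFinset = insert x r.toFinset := toFinset_cons_sorted x s1
      have hcard : (x :: s1).toFinset.card = r.toFinset.card + 1 := by
        rw [htf, Finset.card_insert_of_notMem hxnrF]
      rw [ih r hrlen hrsort]
      have hfP : r.toFinset.filter (fun v => 1 < List.count v (x :: s1))
          = r.toFinset.filter (fun v => 1 < List.count v r) := by
        apply Finset.filter_congr
        intro v hv; rw [hcv v hv]
      have hfN : r.toFinset.filter (fun v => List.count v (x :: s1) = 1)
          = r.toFinset.filter (fun v => List.count v r = 1) := by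
        apply Finset.filter_congr
        intro v hv; rw [hcv v hv]
      by_cases hT : t.length = 0
      · have hk : ¬ (1 < (1 : Int) + (t.length : Int)) := by omega
        have hcx1 : List.count x (x :: s1) = 1 := by omega
        rw [if_neg hk]
        have hPf : (x :: s1).toFinset.filter (fun v => 1 < List.count v (x :: s1))
            = r.toFinset.filter (fun v => 1 < List.count v r) := by
          rw [htf, Finset.filter_insert, if_neg (by omega), hfP]
        have hNf : (x :: s1).toFinset.filter (fun v => List.count v (x :: s1) = 1)
            = insert x (r.toFinset.filter (fun v => List.count v r = 1)) := by
          rw [htf, Finset.filter_insert, if_pos hcx1, hfN]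
        rw [hPf, hNf, Finset.sum_insert (by simp [hxnrF]), hcard]
        push_cast
        refine Prod.ext (by ring) (Prod.ext (by ring) (by ring))
      · have hk : 1 < (1 : Int) + (t.length : Int) := by omega
        have hcx2 : 1 < List.count x (x :: s1) := by omega
        rw [if_pos hk]
        have hPf : (x :: s1).toFinset.filter (fun v => 1 < List.count v (x :: s1))
            = insert x (r.toFinset.filter (fun v => 1 < List.count v r)) := by
          rw [htf, Finset.filter_insert, if_pos hcx2, hfP]
        have hNf : (x :: s1).toFinset.filter (fun v => List.count v (x :: s1) = 1)
            = r.toFinset.filter (fun v => List.count v r = 1) := by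
          rw [htf, Finset.filter_insert, if_neg (by omega), hfN]
        rw [hPf, hNf, Finset.sum_insert (by simp [hxnrF]), hcard]
        push_cast
        refine Prod.ext (by ring) (Prod.ext (by ring) (by ring))

theorem nodup_filter_count_one (row : List Int) :
    (row.filter (fun n => List.count n row == 1)).Nodup := by
  rw [List.nodup_iff_count_le_one]
  intro a
  by_cases hp : ((fun n => List.count n row == 1) a) = true
  · rw [List.count_filter (p := fun n => List.count n row == 1) hp]
    exact le_of_eq (by simpa using hp)
  · have hnm : a ∉ row.filter (fun n => List.count n row == 1) := by
      intro hmem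
      exact hp (List.mem_filter.mp hmem).2
    simp [List.count_eq_zero_of_not_mem hnm]

theorem check_spec' (row : List Int) : check row = check_alt row := by
  unfold check check_alt
  simp only [check_foldA row row, PySem.Set.update_empty, List.nil_append]
  have hperm : (PySem.List.sorted row (fun v => v) false).Perm row :=
    PySem.List.sorted_perm row (fun v => v) false
  have hpw : (PySem.List.sorted row (fun v => v) false).Pairwise (· ≤ ·) := by
    have := PySem.List.sorted_pairwise (xs := row) (key := fun v => v)
    simpa using this
  rw [runLoop_spec (PySem.List.sorted row (fun v => v) false).length _ le_rfl hpw]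
  have htf : (PySem.List.sorted row (fun v => v) false).toFinset = row.toFinset :=
    List.toFinset_eq_of_perm _ _ hperm
  have hcnt : ∀ v, List.count v (PySem.List.sorted row (fun v => v) false)
      = List.count v row := fun v => hperm.count_eq v
  have hsetf : (PySem.Set.ofList row).toFinset = row.toFinset := by
    ext v; simp [PySem.Set.mem_ofList]
  have hlen : (PySem.Set.ofList row).length = row.toFinset.card := by
    rw [← hsetf]
    exact (List.toFinset_card_of_nodup (PySem.Set.nodup_ofList row)).symm
  have hsumP : (PySem.Set.ofList (row.filter (fun n => decide (1 < List.count n row)))).sum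
      = ∑ v ∈ row.toFinset.filter (fun v => 1 < List.count v row), v := by
    rw [set_sum_toFinset, List.toFinset_filter]
    apply Finset.sum_congr _ (fun _ _ => rfl)
    apply Finset.filter_congr
    intro v _; simp
  have hsumN : (row.filter (fun n => List.count n row == 1)).sum
      = ∑ v ∈ row.toFinset.filter (fun v => List.count v row = 1), v := by
    rw [show (row.filter (fun n => List.count n row == 1)).sum
        = ∑ v ∈ (row.filter (fun n => List.count n row == 1)).toFinset, v from by
      rw [List.sum_toFinset _ (nodup_filter_count_one row)]; simp]
    rw [List.toFinset_filter]
    apply Finset.sum_congr _ (fun _ _ => rfl)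
    apply Finset.filter_congr
    intro v _; simp
  simp only [htf, hcnt, hsumP, hsumN, PySem.Set.len, hlen, zero_add]
  split <;> simp_all
  omega

-- ===== VERDICT (by name: the statement is the Claim_ definition above) =====
theorem check_spec : Claim_equal_check := by
  intro row _
  exact check_spec' row
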